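-- pv_equiv track=rewrite | github.com/amazon-ion/ion-hash-python | ionhash/hasher.py | _bytearray_comparator
-- ===== SOURCE A (Python) =====
-- def _bytearray_comparator(a, b):
--     """Implements a comparator using the lexicographical ordering of octets as unsigned integers."""
--     a_len = len(a)
--     b_len = len(b)
--     i = 0
--     while i < a_len and i < b_len:
--         a_byte = a[i]
--         b_byte = b[i]
--         if a_byte != b_byte:
--             if a_byte - b_byte < 0:
--                 return -1
--             else:
--                 return 1
--         i += 1
--
--     len_diff = a_len - b_len
--     if len_diff < 0:
--         return -1
--     elif len_diff > 0:
--         return 1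
--     else:
--         return 0
-- ===== SOURCE B (Python) =====
-- def _bytearray_comparator(a, b):
--     """Three-way compare via Python's built-in lexicographic sequence comparison."""
--     return (a > b) - (a < b)
-- ===== Notes on version B (the rewrite author's own statement) =====
-- stated objective: idiomatic
-- what changed: Replaced the explicit index-driven while loop and length tiebreak with a single expression using Python's built-in lexicographic sequence comparison: (a > b) - (a < b).
import Mathlib
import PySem

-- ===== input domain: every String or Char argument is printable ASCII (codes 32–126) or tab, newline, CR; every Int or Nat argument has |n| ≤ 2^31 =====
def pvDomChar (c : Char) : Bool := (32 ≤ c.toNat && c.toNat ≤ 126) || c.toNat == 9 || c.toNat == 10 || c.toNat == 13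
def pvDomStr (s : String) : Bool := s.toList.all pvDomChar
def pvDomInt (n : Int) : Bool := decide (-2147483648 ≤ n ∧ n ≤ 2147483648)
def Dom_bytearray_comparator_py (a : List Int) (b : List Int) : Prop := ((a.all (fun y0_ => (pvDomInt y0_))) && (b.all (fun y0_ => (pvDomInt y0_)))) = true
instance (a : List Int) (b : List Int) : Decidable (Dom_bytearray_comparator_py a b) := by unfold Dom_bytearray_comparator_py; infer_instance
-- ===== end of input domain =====

-- B replaces A's explicit while loop with Python's built-in lexicographic sequence comparison (idiomatic; same cost).
-- ===== PORT A =====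
-- the while loop of A, advancing over the two lists in lockstep; at loop exit the
-- remaining-length difference equals a_len - b_len since i elements were consumed from each
def pvCmpLoopA : List Int → List Int → Int
  | a_byte :: as, b_byte :: bs =>
      if a_byte ≠ b_byte then (if a_byte - b_byte < 0 then -1 else 1)
      else pvCmpLoopA as bs
  | as, bs =>
      let len_diff : Int := (as.length : Int) - (bs.length : Int)
      if len_diff < 0 then -1 else if len_diff > 0 then 1 else 0

def bytearray_comparator_py (a : List Int) (b : List Int) : Int := pvCmpLoopA a b

-- ===== PORT B =====
-- Python's '<' on lists of ints (lexicographic, shorter prefix is smaller)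
def pvListLt : List Int → List Int → Bool
  | [], [] => false
  | [], _ :: _ => true
  | _ :: _, [] => false
  | x :: xs, y :: ys => if x < y then true else if y < x then false else pvListLt xs ys

-- (a > b) - (a < b)
def bytearray_comparator_py_alt (a : List Int) (b : List Int) : Int :=
  (if pvListLt b a then (1 : Int) else 0) - (if pvListLt a b then (1 : Int) else 0)

-- ===== PRECONDITION & SPEC =====
def Spec_bytearray_comparator_py (a : List Int) (b : List Int) (out : Int) : Prop := out = bytearray_comparator_py_alt a b
instance (a : List Int) (b : List Int) (out : Int) : Decidable (Spec_bytearray_comparator_py a b out) := by unfold Spec_bytearray_comparator_py; infer_instance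

-- ===== CLAIM (what is proved, stated in full; the proofs are below) =====
def Claim_equal_bytearray_comparator_py : Prop := ∀ (a : List Int) (b : List Int), Dom_bytearray_comparator_py a b → Spec_bytearray_comparator_py a b (bytearray_comparator_py a b)

-- ===== LEMMAS AND PROOFS =====

-- ===== VERDICT (by name: the statement is the Claim_ definition above) =====
theorem pvCmp_eq (a b : List Int) : pvCmpLoopA a b = bytearray_comparator_py_alt a b := by
  induction a generalizing b with
  | nil =>
      cases b with
      | nil => simp [pvCmpLoopA, bytearray_comparator_py_alt, pvListLt]
      | cons y ys =>
          simp only [pvCmpLoopA, bytearray_comparator_py_alt, pvListLt]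
          have : (0:Int) ≤ (ys.length : Int) := Int.natCast_nonneg _
          simp only [List.length, List.length_cons]
          push_cast
          split_ifs <;> omega
  | cons x xs ih =>
      cases b with
      | nil =>
          simp only [pvCmpLoopA, bytearray_comparator_py_alt, pvListLt]
          have : (0:Int) ≤ (xs.length : Int) := Int.natCast_nonneg _
          simp only [List.length, List.length_cons]
          push_cast
          split_ifs <;> omega
      | cons y ys =>
          by_cases hxy : x = y
          · subst hxy
            simpa [pvCmpLoopA, bytearray_comparator_py_alt, pvListLt] using ih ys
          · have hlt : x < y ∨ y < x := lt_or_gt_of_ne hxy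
            rcases hlt with h | h <;>
              simp [pvCmpLoopA, bytearray_comparator_py_alt, pvListLt, hxy, h,
                    not_lt.mpr (le_of_lt h)] <;> omega

theorem bytearray_comparator_py_spec : Claim_equal_bytearray_comparator_py := by
  intro a b _
  unfold Spec_bytearray_comparator_py bytearray_comparator_py
  exact pvCmp_eq a b
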